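-- pv_equiv track=rewrite | github.com/jbedichekTT/api_database_tools | tools/get_decomposed_function.py | _build_name_variants
-- ===== SOURCE A (Python) =====
-- from typing import Dict, List, Set, Optional, Tuple, Any
--
-- def _build_name_variants(name: str) -> List[str]:
--     """Generate all possible variants of a function name for lookup."""
--     variants = [name]
--
--     # Handle namespace separators (:: vs _)
--     if '::' in name:
--         # Try with underscores
--         variants.append(name.replace('::', '_'))
--
--         # Try just the last component
--         parts = name.split('::')
--         variants.append(parts[-1])
--
--         # Try joining with single underscore
--         variants.append('_'.join(parts))
--     elif '_' in name:
--         # Try with :: at various positions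
--         parts = name.split('_')
--
--         # Try different namespace splits
--         for i in range(1, len(parts)):
--             namespace = '_'.join(parts[:i])
--             func = '_'.join(parts[i:])
--             variants.append(f"{namespace}::{func}")
--
--     return variants
-- ===== SOURCE B (Python) =====
-- from typing import List
--
--
-- def _build_name_variants(name: str) -> List[str]:
--     """Generate all possible variants of a function name for lookup."""
--     variants = [name]
--
--     if '::' in name:
--         parts = name.split('::')
--         variants += [name.replace('::', '_'), parts[-1], '_'.join(parts)]
--     elif '_' in name:
--         # One scan over the characters: each underscore position yields the
--         # variant with that underscore replaced by '::'.
--         for i, ch in enumerate(name):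
--             if ch == '_':
--                 variants.append(name[:i] + '::' + name[i + 1:])
--
--     return variants
-- ===== Notes on version B (the rewrite author's own statement) =====
-- stated objective: simpler
-- what changed: The '_' branch no longer builds a split-parts list and rejoins prefix/suffix for each split point; B does one scan over the characters and, at each underscore position i, emits name[:i] + '::' + name[i+1:].
import Mathlib
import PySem

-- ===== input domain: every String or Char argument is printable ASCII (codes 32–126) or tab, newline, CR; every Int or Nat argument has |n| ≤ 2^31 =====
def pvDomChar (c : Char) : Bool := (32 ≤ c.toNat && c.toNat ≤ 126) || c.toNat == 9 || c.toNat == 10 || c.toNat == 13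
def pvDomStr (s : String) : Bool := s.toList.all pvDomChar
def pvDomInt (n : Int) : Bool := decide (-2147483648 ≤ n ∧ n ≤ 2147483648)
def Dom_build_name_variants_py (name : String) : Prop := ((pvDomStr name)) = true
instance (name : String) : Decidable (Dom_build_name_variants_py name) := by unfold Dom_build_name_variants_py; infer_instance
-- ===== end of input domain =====

-- B keeps the '::' branch but replaces A's split/rejoin loop by a single scan over
-- the characters of `name`, appending name[:i] ++ "::" ++ name[i+1:] at each underscore (objective: simpler).

-- ===== PORT A =====
def build_name_variants_py (name : String) : List String :=
  let variants := [name]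
  if PySem.Str.isIn "::" name then
    let variants := variants ++ [PySem.Str.replace name "::" "_"]
    let parts := (PySem.Str.split? name "::").getD []   -- sep ≠ "", so split? is some
    -- parts[-1]: str.split always returns a nonempty list, so pyGet? is some
    let variants := variants ++ [(PySem.List.pyGet? parts (-1)).getD ""]
    let variants := variants ++ [PySem.Str.join "_" parts]
    variants
  else if PySem.Str.isIn "_" name then
    let parts := (PySem.Str.split? name "_").getD []    -- sep ≠ "", so split? is some
    (PySem.List.pyRange 1 (parts.length : Int) 1).foldl
      (fun acc i =>
        acc ++ [PySem.Str.join "_" (PySem.List.slice parts none (some i)) ++ "::" ++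
                PySem.Str.join "_" (PySem.List.slice parts (some i) none)])
      variants
  else variants

-- ===== PORT B =====
def build_name_variants_py_alt (name : String) : List String :=
  let variants := [name]
  if PySem.Str.isIn "::" name then
    let parts := (PySem.Str.split? name "::").getD []   -- sep ≠ "", so split? is some
    -- parts[-1]: str.split always returns a nonempty list, so pyGet? is some
    variants ++ [PySem.Str.replace name "::" "_", (PySem.List.pyGet? parts (-1)).getD "",
                 PySem.Str.join "_" parts]
  else if PySem.Str.isIn "_" name then
    (PySem.List.enumerate name.toList 0).foldl
      (fun acc p =>
        if p.2 == '_' then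
          acc ++ [PySem.Str.slice name none (some p.1) ++ "::" ++
                  PySem.Str.slice name (some (p.1 + 1)) none]
        else acc)
      variants
  else variants

-- ===== PRECONDITION & SPEC =====
def Spec_build_name_variants_py (name : String) (out : List String) : Prop := out = build_name_variants_py_alt name
instance (name : String) (out : List String) : Decidable (Spec_build_name_variants_py name out) := by unfold Spec_build_name_variants_py; infer_instance

-- ===== CLAIM (what is proved, stated in full; the proofs are below) =====
def Claim_equal_build_name_variants_py : Prop := ∀ (name : String), Dom_build_name_variants_py name → Spec_build_name_variants_py name (build_name_variants_py name)

-- ===== LEMMAS AND PROOFS =====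

-- structural form of PySem.Chars.splitOn on the single-char separator '_':
-- splitU cs = (first part, remaining parts)
def splitU : List Char → List Char × List (List Char)
  | [] => ([], [])
  | c :: rest =>
    let r := splitU rest
    if c = '_' then ([], r.1 :: r.2) else (c :: r.1, r.2)

theorem go_split : ∀ (fuel : Nat) (l cur : List Char) (acc : List (List Char)), l.length ≤ fuel →
    PySem.Chars.splitOn.go ['_'] fuel l cur acc =
      acc.reverse ++ (cur.reverse ++ (splitU l).1) :: (splitU l).2 := by
  intro fuel
  induction fuel with
  | zero =>
    intro l cur acc h
    have : l = [] := by cases l <;> simp_all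
    subst this; simp [PySem.Chars.splitOn.go, splitU]
  | succ n ih =>
    intro l cur acc h
    cases l with
    | nil => simp [PySem.Chars.splitOn.go, splitU]
    | cons c rest =>
      by_cases hc : c = '_'
      · subst hc
        rw [show PySem.Chars.splitOn.go ['_'] (n+1) ('_' :: rest) cur acc
            = PySem.Chars.splitOn.go ['_'] n rest [] (cur.reverse :: acc) from by
          simp [PySem.Chars.splitOn.go, List.isPrefixOf]]
        rw [ih rest [] _ (by simpa using h)]
        simp [splitU]
      · rw [show PySem.Chars.splitOn.go ['_'] (n+1) (c :: rest) cur acc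
            = PySem.Chars.splitOn.go ['_'] n rest (c :: cur) acc from by
          have : (['_'].isPrefixOf (c :: rest)) = false := by
            simp [List.isPrefixOf]; exact fun e => absurd e.symm hc
          simp [PySem.Chars.splitOn.go, this]]
        rw [ih rest (c :: cur) _ (by simpa using h)]
        simp [splitU, hc]

theorem splitOn_underscore (cs : List Char) :
    PySem.Chars.splitOn cs ['_'] = (splitU cs).1 :: (splitU cs).2 := by
  rw [show PySem.Chars.splitOn cs ['_'] = PySem.Chars.splitOn.go ['_'] (cs.length+1) cs [] [] from rfl]
  rw [go_split _ _ _ _ (by omega)]; simp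

-- the list of underscore-split variants, defined structurally on the characters
def usVariants : List Char → List (List Char)
  | [] => []
  | c :: rest =>
    (if c = '_' then [':' :: ':' :: rest] else []) ++ (usVariants rest).map (c :: ·)

theorem join_cons_head (c : Char) (p : List Char) (ps : List (List Char)) :
    PySem.Chars.join ['_'] ((c :: p) :: ps) = c :: PySem.Chars.join ['_'] (p :: ps) := by
  cases ps with
  | nil => simp [PySem.Chars.join_singleton]
  | cons q qs => rw [PySem.Chars.join_cons_cons, PySem.Chars.join_cons_cons]; simp

theorem join_splitU (cs : List Char) :
    PySem.Chars.join ['_'] ((splitU cs).1 :: (splitU cs).2) = cs := by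
  induction cs with
  | nil => simp [splitU, PySem.Chars.join_singleton]
  | cons c rest ih =>
    by_cases hc : c = '_'
    · subst hc
      simp only [splitU, reduceIte]
      rw [PySem.Chars.join_cons_cons]
      simpa using ih
    · simp only [splitU, if_neg hc]
      rw [join_cons_head, ih]

theorem a_side (cs : List Char) :
    (List.range (splitU cs).2.length).map
      (fun k => PySem.Chars.join ['_'] (((splitU cs).1 :: (splitU cs).2).take (k+1)) ++
        [':', ':'] ++ PySem.Chars.join ['_'] (((splitU cs).1 :: (splitU cs).2).drop (k+1)))
    = usVariants cs := by
  induction cs with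
  | nil => simp [splitU, usVariants]
  | cons c rest ih =>
    by_cases hc : c = '_'
    · subst hc
      simp only [splitU, reduceIte, usVariants]
      rw [List.length_cons, List.range_succ_eq_map, List.map_cons, List.map_map]
      congr 1
      · simpa using join_splitU rest
      · rw [← ih, List.map_map]
        show _ = List.map _ _
        apply List.map_congr_left
        intro k _
        simp only [Function.comp_apply, List.take_succ_cons, List.drop_succ_cons]
        cases hk : List.take (k+1) ((splitU rest).1 :: (splitU rest).2) with
        | nil => simp at hk
        | cons q qs =>
          rw [PySem.Chars.join_cons_cons]
          simp
    · simp only [splitU, usVariants, if_neg hc, List.nil_append]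
      rw [← ih, List.map_map]
      apply List.map_congr_left
      intro k _
      simp only [Function.comp_apply, List.take_succ_cons, List.drop_succ_cons]
      rw [join_cons_head]
      simp

theorem b_side : ∀ (cs pre : List Char),
    ((PySem.List.enumerate cs (pre.length : Int)).filter (fun p => p.2 == '_')).map
      (fun p => PySem.List.slice (pre ++ cs) none (some p.1) ++ [':', ':'] ++
        PySem.List.slice (pre ++ cs) (some (p.1 + 1)) none)
    = (usVariants cs).map (pre ++ ·) := by
  intro cs
  induction cs with
  | nil => intro pre; simp [PySem.List.enumerate_nil, usVariants]
  | cons c rest ih =>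
    intro pre
    rw [PySem.List.enumerate_cons]
    have hlen : ((pre.length : Int) + 1) = (((pre ++ [c]).length : Nat) : Int) := by
      simp
    have hfull : pre ++ c :: rest = (pre ++ [c]) ++ rest := by simp
    by_cases hc : c = '_'
    · subst hc
      rw [List.filter_cons_of_pos (by simp)]
      rw [List.map_cons]
      have h1 : PySem.List.slice (pre ++ '_' :: rest) none (some (pre.length : Int)) = pre := by
        rw [PySem.List.slice_to_natCast]; exact List.take_left
      have h2 : PySem.List.slice (pre ++ '_' :: rest) (some ((pre.length : Int) + 1)) none = rest := by
        rw [hlen, PySem.List.slice_from_natCast, hfull]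
        exact List.drop_left
      rw [h1, h2]
      rw [show (usVariants ('_' :: rest)).map (pre ++ ·)
          = (pre ++ ':' :: ':' :: rest) :: ((usVariants rest).map ('_' :: ·)).map (pre ++ ·) from by
        simp [usVariants]]
      congr 1
      · simp
      · rw [hlen, List.map_map]
        have := ih (pre ++ ['_'])
        rw [hfull]
        rw [this]
        apply List.map_congr_left
        intro x _
        simp
    · rw [List.filter_cons_of_neg (by simpa using hc)]
      rw [show (usVariants (c :: rest)).map (pre ++ ·)
          = ((usVariants rest).map (c :: ·)).map (pre ++ ·) from by
        simp [usVariants, hc]]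
      rw [hlen, List.map_map]
      have := ih (pre ++ [c])
      rw [hfull, this]
      apply List.map_congr_left
      intro x _
      simp

-- parts of A's '_' branch, on the toList side
theorem parts_toList (name : String) :
    ((PySem.Str.split? name "_").getD []).map String.toList
      = (splitU name.toList).1 :: (splitU name.toList).2 := by
  have h := PySem.Str.split?_map name "_"
  rw [show PySem.Chars.split? name.toList "_".toList
      = some (PySem.Chars.splitOn name.toList ['_']) from by
    simp [PySem.Chars.split?]] at h
  cases hs : PySem.Str.split? name "_" with
  | none => rw [hs] at h; simp at h
  | some l =>
    rw [hs] at h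
    simp only [Option.map_some, Option.some.injEq] at h
    simp only [Option.getD_some]
    rw [h, splitOn_underscore]


-- ===== VERDICT (by name: the statement is the Claim_ definition above) =====
theorem build_name_variants_py_spec : Claim_equal_build_name_variants_py := by
  intro name _
  unfold Spec_build_name_variants_py build_name_variants_py build_name_variants_py_alt
  by_cases h1 : PySem.Str.isIn "::" name
  · simp only [h1, if_pos]; rfl
  · simp only [h1, Bool.false_eq_true, if_false]
    by_cases h2 : PySem.Str.isIn "_" name
    · simp only [h2, if_pos]
      rw [PySem.List.foldl_append_if
        (fun (p : Int × Char) => p.2 == '_')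
        (fun (p : Int × Char) => PySem.Str.slice name none (some p.1) ++ "::" ++
                  PySem.Str.slice name (some (p.1 + 1)) none)]
      rw [PySem.List.foldl_append_singleton_eq_map]
      congr 1
      -- both maps produce lists of strings; compare after String.toList
      apply List.map_injective_iff.mpr (fun a b => String.toList_inj.mp)
      rw [List.map_map, List.map_map]
      set parts := (PySem.Str.split? name "_").getD [] with hparts
      have hp : parts.map String.toList = (splitU name.toList).1 :: (splitU name.toList).2 :=
        parts_toList name
      have hlen : parts.length = (splitU name.toList).2.length + 1 := by
        have := congrArg List.length hp
        simpa using this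
      have hB := b_side name.toList []
      simp only [List.length_nil, Nat.cast_zero, List.nil_append, List.map_id'] at hB
      trans (usVariants name.toList)
      · -- A side
        rw [PySem.List.pyRange_one, List.map_map]
        have hR : (((parts.length : Int)) - 1).toNat = (splitU name.toList).2.length := by omega
        rw [hR, ← a_side name.toList]
        apply List.map_congr_left
        intro k _
        simp only [Function.comp_apply]
        have hcast : (1 : Int) + (k : Int) = (((k + 1 : Nat)) : Int) := by push_cast; omega
        rw [hcast, PySem.List.slice_to_natCast, PySem.List.slice_from_natCast]
        rw [String.toList_append, String.toList_append]
        rw [PySem.Str.toList_join, PySem.Str.toList_join]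
        rw [List.map_take, List.map_drop, hp]
        rfl
      · -- B side
        rw [← hB]
        apply List.map_congr_left
        intro p _
        simp only [Function.comp_apply]
        rw [String.toList_append, String.toList_append]
        simp [PySem.Str.toList_slice]
    · simp only [h2, Bool.false_eq_true, if_false]
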